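-- pv_equiv track=rewrite | github.com/mepavan7/python-leetcode | maxpairsum.py | maxPairSum
-- ===== SOURCE A (Python) =====
-- import math
--
-- def maxPairSum(nums, k):
--     nums.sort()
--     l = 0
--     r = len(nums) - 1
--
--     # Initialize to negative infinity to correctly handle negative sums.
--     max_sum = -math.inf
--
--     while l < r:
--         s = nums[l] + nums[r]
--         if s < k:
--             max_sum = max(max_sum, s)
--             l += 1
--         else:
--             r -= 1
--
--     # If max_sum was never updated, no valid pair was found. Return -1.
--     # Otherwise, return the closest sum we found.
--     return -1 if max_sum == -math.inf else int(max_sum)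
-- ===== SOURCE B (Python) =====
-- def maxPairSum(nums, k):
--     # Alternative: sort (kept for A's in-place side effect), then exhaustively
--     # scan all index pairs, tracking the best sum strictly below k.
--     nums.sort()
--     best = None
--     n = len(nums)
--     for i in range(n):
--         for j in range(i + 1, n):
--             s = nums[i] + nums[j]
--             if s < k and (best is None or s > best):
--                 best = s
--     return -1 if best is None else best
-- ===== Notes on version B (the rewrite author's own statement) =====
-- stated objective: alternative
-- what changed: Keeps the in-place sort but replaces the two-pointer sweep with an exhaustive scan over all index pairs, tracking the best sum strictly below k in an Option-style accumulator.
import Mathlib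
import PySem

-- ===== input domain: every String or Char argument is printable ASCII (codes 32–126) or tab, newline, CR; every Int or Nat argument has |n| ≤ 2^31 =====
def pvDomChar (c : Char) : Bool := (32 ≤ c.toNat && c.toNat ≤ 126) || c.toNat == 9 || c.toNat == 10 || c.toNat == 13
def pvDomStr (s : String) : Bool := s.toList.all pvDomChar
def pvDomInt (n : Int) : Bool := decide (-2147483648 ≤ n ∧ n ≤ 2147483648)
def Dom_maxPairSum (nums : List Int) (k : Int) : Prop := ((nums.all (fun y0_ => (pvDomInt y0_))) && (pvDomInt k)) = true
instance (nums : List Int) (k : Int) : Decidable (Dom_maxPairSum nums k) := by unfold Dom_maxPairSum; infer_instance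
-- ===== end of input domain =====

-- B replaces A's two-pointer sweep by an exhaustive scan over all index pairs (same sort,
-- same in-place mutation of nums in Python); equivalence is about the return value.

-- ===== PORT A =====
-- max(max_sum, s) where max_sum starts at -math.inf: none plays -inf
def pvMaxOpt (acc : Option Int) (s : Int) : Option Int :=
  match acc with
  | none => some s
  | some m => some (max m s)

-- the while loop of A; terminates because r - l shrinks
def pvLoopA (xs : List Int) (k l r : Int) (acc : Option Int) : Option Int :=
  if h : l < r then
    let s := PySem.List.pyGetD xs l 0 + PySem.List.pyGetD xs r 0
    if s < k then pvLoopA xs k (l + 1) r (pvMaxOpt acc s)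
    else pvLoopA xs k l (r - 1) acc
  else acc
termination_by (r - l).toNat
decreasing_by all_goals omega

def maxPairSum (nums : List Int) (k : Int) : Int :=
  let xs := PySem.List.sorted nums (fun x => x) false
  match pvLoopA xs k 0 ((xs.length : Int) - 1) none with
  | none => -1
  | some m => m

-- ===== PORT B =====
-- body of B's inner loop: keep best sum strictly below k
def pvStep (xs : List Int) (k : Int) (best : Option Int) (i j : Int) : Option Int :=
  let s := PySem.List.pyGetD xs i 0 + PySem.List.pyGetD xs j 0
  if s < k && (match best with | none => true | some m => decide (m < s)) then some s else best

def maxPairSum_alt (nums : List Int) (k : Int) : Int :=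
  let xs := PySem.List.sorted nums (fun x => x) false
  let n : Int := (xs.length : Int)
  let best := (PySem.List.pyRange 0 n 1).foldl
    (fun b i => (PySem.List.pyRange (i + 1) n 1).foldl (fun b j => pvStep xs k b i j) b) none
  match best with
  | none => -1
  | some m => m

-- ===== PRECONDITION & SPEC =====
def Spec_maxPairSum (nums : List Int) (k : Int) (out : Int) : Prop := out = maxPairSum_alt nums k
instance (nums : List Int) (k : Int) (out : Int) : Decidable (Spec_maxPairSum nums k out) := by unfold Spec_maxPairSum; infer_instance

-- ===== CLAIM (what is proved, stated in full; the proofs are below) =====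
def Claim_equal_maxPairSum : Prop := ∀ (nums : List Int) (k : Int), Dom_maxPairSum nums k → Spec_maxPairSum nums k (maxPairSum nums k)

-- ===== LEMMAS AND PROOFS =====

def pvG (xs : List Int) (i : Int) : Int := PySem.List.pyGetD xs i 0

-- "out is the maximum of acc and all pair sums < k with indices in the window [l, r]"
def pvGood (xs : List Int) (k l r : Int) (acc out : Option Int) : Prop :=
  (∀ i j : Int, l ≤ i → i < j → j ≤ r → pvG xs i + pvG xs j < k →
      ∃ m, out = some m ∧ pvG xs i + pvG xs j ≤ m) ∧
  (∀ a, acc = some a → ∃ m, out = some m ∧ a ≤ m) ∧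
  (∀ m, out = some m →
      (∃ i j, l ≤ i ∧ i < j ∧ j ≤ r ∧ pvG xs i + pvG xs j = m ∧ m < k) ∨ acc = some m)

theorem pvGood_unique (xs : List Int) (k l r : Int) (acc o1 o2 : Option Int)
    (h1 : pvGood xs k l r acc o1) (h2 : pvGood xs k l r acc o2) : o1 = o2 := by
  obtain ⟨c1, c2, c3⟩ := h1
  obtain ⟨d1, d2, d3⟩ := h2
  match ho1 : o1, ho2 : o2 with
  | none, none => rfl
  | none, some m =>
    rcases d3 m rfl with ⟨i, j, hi, hij, hj, hs, hk⟩ | hacc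
    · obtain ⟨m', hm', _⟩ := c1 i j hi hij hj (by omega)
      simp at hm'
    · obtain ⟨m', hm', _⟩ := c2 m hacc
      simp at hm'
  | some m, none =>
    rcases c3 m rfl with ⟨i, j, hi, hij, hj, hs, hk⟩ | hacc
    · obtain ⟨m', hm', _⟩ := d1 i j hi hij hj (by omega)
      simp at hm'
    · obtain ⟨m', hm', _⟩ := d2 m hacc
      simp at hm'
  | some m1, some m2 =>
    have h12 : m1 ≤ m2 := by
      rcases c3 m1 rfl with ⟨i, j, hi, hij, hj, hs, hk⟩ | hacc
      · obtain ⟨m', hm', hle⟩ := d1 i j hi hij hj (by omega)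
        simp at hm'; omega
      · obtain ⟨m', hm', hle⟩ := d2 m1 hacc
        simp at hm'; omega
    have h21 : m2 ≤ m1 := by
      rcases d3 m2 rfl with ⟨i, j, hi, hij, hj, hs, hk⟩ | hacc
      · obtain ⟨m', hm', hle⟩ := c1 i j hi hij hj (by omega)
        simp at hm'; omega
      · obtain ⟨m', hm', hle⟩ := c2 m2 hacc
        simp at hm'; omega
    simp; omega

theorem pvMono_of_pairwise (ys : List Int) (hp : ys.Pairwise (· ≤ ·)) :
    ∀ i j : Int, 0 ≤ i → i ≤ j → j < (ys.length : Int) → pvG ys i ≤ pvG ys j := by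
  intro i j hi hij hj
  rcases eq_or_lt_of_le hij with rfl | h
  · exact le_refl _
  · rw [pvG, pvG, PySem.List.pyGetD_eq_getElem ys 0 hi (by omega),
      PySem.List.pyGetD_eq_getElem ys 0 (by omega) hj]
    exact List.pairwise_iff_getElem.mp hp i.toNat j.toNat (by omega) (by omega) (by omega)

theorem pvLoopA_good (xs : List Int) (k : Int)
    (hmono : ∀ i j : Int, 0 ≤ i → i ≤ j → j < (xs.length : Int) → pvG xs i ≤ pvG xs j) :
    ∀ (n : Nat) (l r : Int) (acc : Option Int), (r - l).toNat ≤ n → 0 ≤ l →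
      r < (xs.length : Int) → pvGood xs k l r acc (pvLoopA xs k l r acc) := by
  intro n
  induction n with
  | zero =>
    intro l r acc hn hl hr
    have hlr : ¬ l < r := by omega
    rw [pvLoopA]
    simp only [hlr, dite_false]
    refine ⟨?_, ?_, ?_⟩
    · intro i j hi hij hj _; omega
    · intro a ha; exact ⟨a, ha, le_refl a⟩
    · intro m hm; exact Or.inr hm
  | succ n ih =>
    intro l r acc hn hl hr
    by_cases hlr : l < r
    · rw [pvLoopA]
      simp only [hlr, dite_true]
      set s := PySem.List.pyGetD xs l 0 + PySem.List.pyGetD xs r 0 with hs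
      have hsg : s = pvG xs l + pvG xs r := by simp [pvG, hs]
      by_cases hk : s < k
      · simp only [hk, if_true]
        obtain ⟨c1, c2, c3⟩ := ih (l + 1) r (pvMaxOpt acc s) (by omega) (by omega) hr
        refine ⟨?_, ?_, ?_⟩
        · intro i j hi hij hj hlt
          rcases eq_or_lt_of_le hi with rfl | hi'
          · -- i = l : dominated by s = g l + g r
            have hjr : pvG xs j ≤ pvG xs r := hmono j r (by omega) (by omega) hr
            have hb : ∃ t, pvMaxOpt acc s = some t ∧ s ≤ t := by
              cases acc with
              | none => exact ⟨s, rfl, le_refl s⟩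
              | some a => exact ⟨max a s, rfl, le_max_right a s⟩
            obtain ⟨t, ht, hst⟩ := hb
            obtain ⟨m, hm, hle⟩ := c2 t ht
            exact ⟨m, hm, by omega⟩
          · exact c1 i j (by omega) hij hj hlt
        · intro a ha
          have hb : ∃ t, pvMaxOpt acc s = some t ∧ a ≤ t := by
            cases acc with
            | none => simp at ha
            | some a' =>
              have : a' = a := by simpa using ha
              exact ⟨max a' s, rfl, by have := le_max_left a' s; omega⟩
          obtain ⟨t, ht, hat⟩ := hb
          obtain ⟨m, hm, hle⟩ := c2 t ht
          exact ⟨m, hm, by omega⟩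
        · intro m hm
          rcases c3 m hm with ⟨i, j, hi, hij, hj, hsum, hmk⟩ | hb
          · exact Or.inl ⟨i, j, by omega, hij, hj, hsum, hmk⟩
          · cases acc with
            | none =>
              have : s = m := by simpa [pvMaxOpt] using hb
              exact Or.inl ⟨l, r, le_refl l, hlr, le_refl r, by omega, by omega⟩
            | some a =>
              have hmax : max a s = m := by simpa [pvMaxOpt] using hb
              by_cases hc : s ≤ a
              · have : a = m := by omega
                exact Or.inr (by simp [this])
              · have : s = m := by omega
                exact Or.inl ⟨l, r, le_refl l, hlr, le_refl r, by omega, by omega⟩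
      · simp only [hk, if_false]
        obtain ⟨c1, c2, c3⟩ := ih l (r - 1) acc (by omega) hl (by omega)
        refine ⟨?_, ?_, ?_⟩
        · intro i j hi hij hj hlt
          rcases eq_or_lt_of_le hj with rfl | hj'
          · -- j = r : sum ≥ s ≥ k, impossible
            have : pvG xs l ≤ pvG xs i := hmono l i hl hi (by omega)
            omega
          · exact c1 i j hi hij (by omega) hlt
        · exact c2
        · intro m hm
          rcases c3 m hm with ⟨i, j, hi, hij, hj, hsum, hmk⟩ | hb
          · exact Or.inl ⟨i, j, hi, hij, by omega, hsum, hmk⟩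
          · exact Or.inr hb
    · rw [pvLoopA]
      simp only [hlr, dite_false]
      refine ⟨?_, ?_, ?_⟩
      · intro i j hi hij hj _; omega
      · intro a ha; exact ⟨a, ha, le_refl a⟩
      · intro m hm; exact Or.inr hm

theorem pvStep_none (xs : List Int) (k i j : Int) :
    pvStep xs k none i j =
      if pvG xs i + pvG xs j < k then some (pvG xs i + pvG xs j) else none := by
  simp [pvStep, pvG]

theorem pvStep_some (xs : List Int) (k : Int) (a i j : Int) :
    pvStep xs k (some a) i j =
      if pvG xs i + pvG xs j < k ∧ a < pvG xs i + pvG xs j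
      then some (pvG xs i + pvG xs j) else some a := by
  simp only [pvStep, pvG]
  split_ifs with h1 h2 <;> simp_all

-- B's nested fold, flattened over a list of index pairs
theorem pvFold_pairs (xs : List Int) (k : Int) :
    ∀ (ps : List (Int × Int)) (b : Option Int),
      (∀ p ∈ ps, pvG xs p.1 + pvG xs p.2 < k →
          ∃ m, ps.foldl (fun b p => pvStep xs k b p.1 p.2) b = some m ∧
            pvG xs p.1 + pvG xs p.2 ≤ m) ∧
      (∀ a, b = some a →
          ∃ m, ps.foldl (fun b p => pvStep xs k b p.1 p.2) b = some m ∧ a ≤ m) ∧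
      (∀ m, ps.foldl (fun b p => pvStep xs k b p.1 p.2) b = some m →
          (∃ p ∈ ps, pvG xs p.1 + pvG xs p.2 = m ∧ m < k) ∨ b = some m) := by
  intro ps
  induction ps with
  | nil =>
    intro b
    refine ⟨by simp, ?_, ?_⟩
    · intro a ha; exact ⟨a, by simpa using ha, le_refl a⟩
    · intro m hm; exact Or.inr (by simpa using hm)
  | cons p ps ih =>
    intro b
    obtain ⟨c1, c2, c3⟩ := ih (pvStep xs k b p.1 p.2)
    have hstep : ∀ a, b = some a → ∃ t, pvStep xs k b p.1 p.2 = some t ∧ a ≤ t := by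
      intro a ha
      subst ha
      rw [pvStep_some]
      split_ifs with h
      · exact ⟨_, rfl, le_of_lt h.2⟩
      · exact ⟨a, rfl, le_refl a⟩
    refine ⟨?_, ?_, ?_⟩
    · intro q hq hlt
      rcases List.mem_cons.mp hq with rfl | hq'
      · -- the head pair: after pvStep the accumulator dominates its sum
        have hb : ∃ t, pvStep xs k b q.1 q.2 = some t ∧ pvG xs q.1 + pvG xs q.2 ≤ t := by
          cases b with
          | none =>
            rw [pvStep_none, if_pos hlt]
            exact ⟨_, rfl, le_refl _⟩
          | some a =>
            rw [pvStep_some]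
            split_ifs with h
            · exact ⟨_, rfl, le_refl _⟩
            · refine ⟨a, rfl, ?_⟩
              rcases not_and.mp h hlt with h'
              omega
        obtain ⟨t, ht, hts⟩ := hb
        obtain ⟨m, hm, hle⟩ := c2 t ht
        exact ⟨m, by simpa using hm, by omega⟩
      · obtain ⟨m, hm, hle⟩ := c1 q hq' hlt
        exact ⟨m, by simpa using hm, hle⟩
    · intro a ha
      obtain ⟨t, ht, hat⟩ := hstep a ha
      obtain ⟨m, hm, hle⟩ := c2 t ht
      exact ⟨m, by simpa using hm, by omega⟩
    · intro m hm
      rcases c3 m (by simpa using hm) with ⟨q, hq, hsum, hmk⟩ | hb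
      · exact Or.inl ⟨q, List.mem_cons_of_mem _ hq, hsum, hmk⟩
      · cases hb' : b with
        | none =>
          subst hb'
          rw [pvStep_none] at hb
          split_ifs at hb with h
          · exact Or.inl ⟨p, List.mem_cons_self, by simpa using hb, by
              have : pvG xs p.1 + pvG xs p.2 = m := by simpa using hb
              omega⟩
        | some a =>
          subst hb'
          rw [pvStep_some] at hb
          split_ifs at hb with h
          · exact Or.inl ⟨p, List.mem_cons_self, by simpa using hb, by
              have : pvG xs p.1 + pvG xs p.2 = m := by simpa using hb
              omega⟩
          · exact Or.inr hb

theorem pvFoldl_flatMap {α β γ : Type} (l : List α) (f : α → List β) (g : γ → β → γ)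
    (init : γ) :
    (l.flatMap f).foldl g init = l.foldl (fun acc x => (f x).foldl g acc) init := by
  induction l generalizing init with
  | nil => rfl
  | cons x l ih => simp [List.flatMap_cons, List.foldl_append, ih]

-- the two algorithms compute the same optional best sum on any sorted list
theorem pvCore (xs : List Int) (k : Int) (hp : xs.Pairwise (fun a b => a ≤ b)) :
    pvLoopA xs k 0 ((xs.length : Int) - 1) none =
      (PySem.List.pyRange 0 (xs.length : Int) 1).foldl
        (fun b i => (PySem.List.pyRange (i + 1) (xs.length : Int) 1).foldl
          (fun b j => pvStep xs k b i j) b) none := by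
  set n : Int := (xs.length : Int) with hn
  have hmono : ∀ i j : Int, 0 ≤ i → i ≤ j → j < (xs.length : Int) → pvG xs i ≤ pvG xs j :=
    pvMono_of_pairwise xs hp
  have hA : pvGood xs k 0 (n - 1) none (pvLoopA xs k 0 (n - 1) none) :=
    pvLoopA_good xs k hmono ((n - 1) - 0).toNat 0 (n - 1) none (le_refl _) (le_refl 0)
      (by omega)
  set pairs : List (Int × Int) :=
    (PySem.List.pyRange 0 n 1).flatMap
      (fun i => (PySem.List.pyRange (i + 1) n 1).map (fun j => (i, j))) with hpairs
  have hflat :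
      (PySem.List.pyRange 0 n 1).foldl
        (fun b i => (PySem.List.pyRange (i + 1) n 1).foldl (fun b j => pvStep xs k b i j) b)
        none
      = pairs.foldl (fun b p => pvStep xs k b p.1 p.2) none := by
    rw [hpairs, pvFoldl_flatMap]
    congr 1
    funext acc i
    rw [List.foldl_map]
  have hmem : ∀ p : Int × Int, p ∈ pairs ↔ 0 ≤ p.1 ∧ p.1 < p.2 ∧ p.2 < n := by
    intro p
    simp only [hpairs, List.mem_flatMap, List.mem_map, PySem.List.mem_pyRange_one]
    constructor
    · rintro ⟨i, ⟨hi0, hin⟩, j, ⟨hj1, hj2⟩, rfl⟩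
      exact ⟨hi0, by omega, hj2⟩
    · rintro ⟨h1, h2, h3⟩
      exact ⟨p.1, ⟨h1, by omega⟩, p.2, ⟨by omega, h3⟩, rfl⟩
  obtain ⟨b1, b2, b3⟩ := pvFold_pairs xs k pairs none
  have hB : pvGood xs k 0 (n - 1) none (pairs.foldl (fun b p => pvStep xs k b p.1 p.2) none) := by
    refine ⟨?_, ?_, ?_⟩
    · intro i j hi hij hj hlt
      exact b1 (i, j) ((hmem (i, j)).mpr ⟨hi, hij, by omega⟩) hlt
    · intro a ha; simp at ha
    · intro m hm
      rcases b3 m hm with ⟨p, hp', hsum, hmk⟩ | hb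
      · obtain ⟨h1, h2, h3⟩ := (hmem p).mp hp'
        exact Or.inl ⟨p.1, p.2, h1, h2, by omega, hsum, hmk⟩
      · simp at hb
  rw [hflat]
  exact pvGood_unique xs k 0 (n - 1) none _ _ hA hB

-- ===== VERDICT (by name: the statement is the Claim_ definition above) =====
theorem maxPairSum_spec : Claim_equal_maxPairSum := by
  intro nums k _
  have hp : (PySem.List.sorted nums (fun x => x) false).Pairwise (fun a b => a ≤ b) := by
    simpa using PySem.List.sorted_pairwise nums (fun x => x)
  have h := pvCore (PySem.List.sorted nums (fun x => x) false) k hp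
  simp only [Spec_maxPairSum, maxPairSum, maxPairSum_alt, h]
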